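-- pv_equiv track=rewrite | github.com/Akmal2205/TBFO-geming | main_program/HtmlParser.py | string_generalizer
-- ===== SOURCE A (Python) =====
-- def string_generalizer(lst): # Untuk mengeneralisir bentuk string
--     i = 0
--     while i < len(lst):
--         if lst[i] == ">":
--             i += 1
--             while i < len(lst) and lst[i] != "<" and lst[i]!="cmd":
--                 lst[i] = "string"
--                 i += 1
--         else:
--             i += 1
--     return lst
-- ===== SOURCE B (Python) =====
-- def string_generalizer(lst):  # segment splitting: slice out each '>'-opened region and bulk-replace it
--     out = []
--     rest = lst[:]
--     while ">" in rest:
--         j = rest.index(">")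
--         k = next((m for m in range(j + 1, len(rest)) if rest[m] in ("<", "cmd")), len(rest))
--         out += rest[:j + 1] + ["string"] * (k - j - 1)
--         rest = rest[k:]
--     out += rest
--     lst[:] = out
--     return lst
-- ===== Notes on version B (the rewrite author's own statement) =====
-- stated objective: alternative
-- what changed: Replaced the token-by-token nested while-loops sharing a hand-advanced index by a segment-splitting algorithm: repeatedly locate the next opener with list.index, locate the next closing delimiter after it, and emit the untouched slice plus a bulk replicated replacement for the region in between.
import Mathlib
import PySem

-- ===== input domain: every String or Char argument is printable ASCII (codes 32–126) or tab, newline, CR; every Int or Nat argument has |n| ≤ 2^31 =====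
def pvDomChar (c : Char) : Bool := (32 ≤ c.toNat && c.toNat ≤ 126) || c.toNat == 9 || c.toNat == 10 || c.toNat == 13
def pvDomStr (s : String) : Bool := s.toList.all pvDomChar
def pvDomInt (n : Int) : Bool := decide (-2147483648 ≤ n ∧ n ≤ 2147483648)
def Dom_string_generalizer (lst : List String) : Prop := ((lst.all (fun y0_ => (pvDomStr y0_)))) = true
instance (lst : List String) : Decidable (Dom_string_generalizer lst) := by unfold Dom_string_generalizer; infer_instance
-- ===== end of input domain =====

-- B replaces A's token-by-token nested while-loops by segment splitting (find next '>', find the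
-- next '<'/'cmd', bulk-replace the slice in between); same return value. A mutates its argument in
-- place (B does too in Python); the equivalence proved here is about the return value.

-- ===== PORT A =====
-- inner while: while i < len(lst) and lst[i] != "<" and lst[i] != "cmd": lst[i] = "string"; i += 1
-- (the fuel arguments only totalize the two while loops; they never run out: i grows by ≥ 1 per pass)
def pvInnerA : Nat → List String → Nat → List String × Nat
  | 0, lst, i => (lst, i)
  | fuel + 1, lst, i =>
    if i < lst.length ∧ lst[i]! ≠ "<" ∧ lst[i]! ≠ "cmd" then
      pvInnerA fuel (lst.set i "string") (i + 1)
    else (lst, i)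

-- outer while over the shared index i
def pvOuterA : Nat → List String → Nat → List String
  | 0, lst, _ => lst
  | fuel + 1, lst, i =>
    if i < lst.length then
      if lst[i]! = ">" then
        pvOuterA fuel (pvInnerA lst.length lst (i + 1)).1 (pvInnerA lst.length lst (i + 1)).2
      else pvOuterA fuel lst (i + 1)
    else lst

def string_generalizer (lst : List String) : List String := pvOuterA (lst.length + 1) lst 0

-- ===== PORT B =====
-- k = next((m for m in range(j+1, len(rest)) if rest[m] in ("<","cmd")), len(rest))
def pvFindStop (rest : List String) (m : Nat) : Nat :=
  if _h : m < rest.length then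
    if rest[m]! = "<" ∨ rest[m]! = "cmd" then m else pvFindStop rest (m + 1)
  else rest.length
termination_by rest.length - m

-- ">" in rest / rest.index(">") combined into one match on the first-occurrence index (exact);
-- the fuel argument only totalizes the while loop (it never runs out: each pass drops ≥ 1 token)
def pvAltLoop : Nat → List String → List String → List String
  | 0, out, rest => out ++ rest
  | fuel + 1, out, rest =>
    match PySem.List.index? rest ">" with
    | none => out ++ rest
    | some j =>
      let k := pvFindStop rest (j + 1)
      pvAltLoop fuel (out ++ rest.take (j + 1) ++ List.replicate (k - j - 1) "string") (rest.drop k)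

def string_generalizer_alt (lst : List String) : List String := pvAltLoop (lst.length + 1) [] lst

-- ===== PRECONDITION & SPEC =====
def Spec_string_generalizer (lst : List String) (out : List String) : Prop := out = string_generalizer_alt lst
instance (lst : List String) (out : List String) : Decidable (Spec_string_generalizer lst out) := by unfold Spec_string_generalizer; infer_instance

-- ===== CLAIM (what is proved, stated in full; the proofs are below) =====
def Claim_equal_string_generalizer : Prop := ∀ (lst : List String), Dom_string_generalizer lst → Spec_string_generalizer lst (string_generalizer lst)

-- ===== LEMMAS AND PROOFS =====
-- proof-only well-founded twins of port A's fuelled loops, and the bridge between them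
def pvInnerW (lst : List String) (i : Nat) : List String × Nat :=
  if _h : i < lst.length ∧ lst[i]! ≠ "<" ∧ lst[i]! ≠ "cmd" then
    pvInnerW (lst.set i "string") (i + 1)
  else (lst, i)
termination_by lst.length - i
decreasing_by simp [List.length_set]; omega

theorem pvInnerW_len (lst : List String) (i : Nat) : (pvInnerW lst i).1.length = lst.length := by
  induction lst, i using pvInnerW.induct with
  | case1 lst i h ih => rw [pvInnerW, dif_pos h]; simpa using ih
  | case2 lst i h => rw [pvInnerW, dif_neg h]

theorem pvInnerW_ge (lst : List String) (i : Nat) : i ≤ (pvInnerW lst i).2 := by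
  induction lst, i using pvInnerW.induct with
  | case1 lst i h ih => rw [pvInnerW, dif_pos h]; omega
  | case2 lst i h => rw [pvInnerW, dif_neg h]

def pvOuterW (lst : List String) (i : Nat) : List String :=
  if _h : i < lst.length then
    if lst[i]! = ">" then
      pvOuterW (pvInnerW lst (i + 1)).1 (pvInnerW lst (i + 1)).2
    else
      pvOuterW lst (i + 1)
  else lst
termination_by lst.length - i
decreasing_by
  · have h1 := pvInnerW_len lst (i + 1)
    have h2 := pvInnerW_ge lst (i + 1)
    omega
  · omega

theorem pvInnerA_eq : ∀ (fuel : Nat) (lst : List String) (i : Nat), lst.length ≤ i + fuel →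
    pvInnerA fuel lst i = pvInnerW lst i := by
  intro fuel
  induction fuel with
  | zero =>
    intro lst i h
    rw [pvInnerA, pvInnerW, dif_neg (by omega)]
  | succ fuel ih =>
    intro lst i h
    rw [pvInnerA, pvInnerW]
    by_cases hc : i < lst.length ∧ lst[i]! ≠ "<" ∧ lst[i]! ≠ "cmd"
    · rw [if_pos hc, dif_pos hc, ih _ _ (by simp; omega)]
    · rw [if_neg hc, dif_neg hc]

theorem pvOuterA_eq : ∀ (fuel : Nat) (lst : List String) (i : Nat), lst.length < i + fuel →
    pvOuterA fuel lst i = pvOuterW lst i := by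
  intro fuel
  induction fuel with
  | zero =>
    intro lst i h
    rw [pvOuterA, pvOuterW, dif_neg (by omega)]
  | succ fuel ih =>
    intro lst i h
    rw [pvOuterA, pvOuterW]
    by_cases hi : i < lst.length
    · rw [if_pos hi, dif_pos hi]
      by_cases hgt : lst[i]! = ">"
      · rw [if_pos hgt, if_pos hgt, pvInnerA_eq lst.length lst (i + 1) (by omega)]
        exact ih _ _ (by
          have h1 := pvInnerW_len lst (i + 1)
          have h2 := pvInnerW_ge lst (i + 1)
          omega)
      · rw [if_neg hgt, if_neg hgt]
        exact ih _ _ (by omega)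
    · rw [if_neg hi, dif_neg hi]

-- the intermediate description both ports are proved equal to: a one-pass flag state machine
def pvAltGo (inside : Bool) : List String → List String
  | [] => []
  | t :: rest =>
    if inside then
      if t = "<" ∨ t = "cmd" then t :: pvAltGo false rest
      else "string" :: pvAltGo true rest
    else if t = ">" then t :: pvAltGo true rest
    else t :: pvAltGo false rest

theorem pv_drop_cons (lst : List String) (i : Nat) (h : i < lst.length) :
    lst.drop i = lst[i] :: lst.drop (i + 1) := by
  exact (List.getElem_cons_drop h).symm

theorem pv_take_succ (lst : List String) (i : Nat) (h : i < lst.length) :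
    lst.take (i + 1) = lst.take i ++ [lst[i]] := by
  rw [List.take_add_one, List.getElem?_eq_getElem h]
  rfl

-- A-side: the joint invariant — A's outer loop at i = the flag-false machine on the suffix,
-- and A's inner loop (then outer) at i = the flag-true machine on the suffix
theorem pv_joint (n : Nat) : ∀ (lst : List String) (i : Nat), lst.length - i = n →
    (pvOuterW (pvInnerW lst i).1 (pvInnerW lst i).2 = lst.take i ++ pvAltGo true (lst.drop i)) ∧
    (pvOuterW lst i = lst.take i ++ pvAltGo false (lst.drop i)) := by
  induction n using Nat.strong_induction_on with
  | _ n ih =>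
    intro lst i hn
    by_cases hi : i < lst.length
    · have hget : lst[i]! = lst[i] := getElem!_pos lst i hi
      have hdrop := pv_drop_cons lst i hi
      have htake := pv_take_succ lst i hi
      constructor
      · -- inner part
        by_cases hc : lst[i] ≠ "<" ∧ lst[i] ≠ "cmd"
        · rw [pvInnerW, dif_pos ⟨hi, by rw [hget]; exact hc.1, by rw [hget]; exact hc.2⟩]
          have hlen : (lst.set i "string").length = lst.length := by simp
          have := (ih (lst.length - (i+1)) (by omega) (lst.set i "string") (i + 1)
            (by simp)).1
          rw [this]
          have h1 : (lst.set i "string").take (i + 1) = lst.take i ++ ["string"] := by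
            rw [pv_take_succ _ _ (by omega : i < (lst.set i "string").length)]
            simp [List.take_set, List.set_eq_of_length_le (by simp : (List.take i lst).length ≤ i)]
          have h2 : (lst.set i "string").drop (i + 1) = lst.drop (i + 1) := by
            rw [List.drop_set]; simp
          rw [h1, h2, hdrop]
          simp [pvAltGo, hc.1, hc.2]
        · -- inner loop stops: lst[i] is "<" or "cmd"
          push Not at hc
          have hstop : ¬ (i < lst.length ∧ lst[i]! ≠ "<" ∧ lst[i]! ≠ "cmd") := by
            rw [hget]; tauto
          rw [pvInnerW, dif_neg hstop]
          by_cases hlt : lst[i] = "<"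
          · rw [pvOuterW, dif_pos hi, if_neg (by rw [hget, hlt]; decide)]
            have := (ih (lst.length - (i+1)) (by omega) lst (i + 1) rfl).2
            rw [this, htake, hdrop]
            simp [pvAltGo, hlt]
          · have hcmd : lst[i] = "cmd" := by tauto
            rw [pvOuterW, dif_pos hi, if_neg (by rw [hget, hcmd]; decide)]
            have := (ih (lst.length - (i+1)) (by omega) lst (i + 1) rfl).2
            rw [this, htake, hdrop]
            simp [pvAltGo, hcmd]
      · -- outer part
        by_cases hgt : lst[i] = ">"
        · rw [pvOuterW, dif_pos hi, if_pos (by rw [hget, hgt])]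
          have := (ih (lst.length - (i+1)) (by omega) lst (i + 1) rfl).1
          rw [this, htake, hdrop]
          simp [pvAltGo, hgt]
        · rw [pvOuterW, dif_pos hi, if_neg (by rw [hget]; exact hgt)]
          have := (ih (lst.length - (i+1)) (by omega) lst (i + 1) rfl).2
          rw [this, htake, hdrop]
          simp [pvAltGo, hgt]
          rw [htake, List.append_assoc]
          rfl
    · -- i ≥ length: both loops stop
      have hstop : ¬ (i < lst.length ∧ lst[i]! ≠ "<" ∧ lst[i]! ≠ "cmd") := by tauto
      have hdrop : lst.drop i = [] := List.drop_eq_nil_of_le (by omega)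
      have htake : lst.take i = lst := List.take_of_length_le (by omega)
      rw [pvInnerW, dif_neg hstop]
      constructor <;> rw [pvOuterW, dif_neg hi] <;> simp [hdrop, htake, pvAltGo]

-- B-side bridge lemmas
-- leading-non-stop count of a list
def pvFindL : List String → Nat
  | [] => 0
  | t :: r => if t = "<" ∨ t = "cmd" then 0 else pvFindL r + 1

theorem pvFindStop_eq_findL (rest : List String) (m : Nat) (h : m ≤ rest.length) :
    pvFindStop rest m = m + pvFindL (rest.drop m) := by
  induction m using pvFindStop.induct rest with
  | case1 m h1 h2 =>
    rw [pvFindStop, dif_pos h1, if_pos h2, pv_drop_cons rest m h1]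
    rw [getElem!_pos rest m h1] at h2
    simp [pvFindL, h2]
  | case2 m h1 h2 ih =>
    rw [pvFindStop, dif_pos h1, if_neg h2, ih (by omega), pv_drop_cons rest m h1]
    rw [getElem!_pos rest m h1] at h2
    simp [pvFindL, h2]; omega
  | case3 m h1 =>
    rw [pvFindStop, dif_neg h1]
    have hm : rest.length ≤ m := by omega
    rw [List.drop_eq_nil_of_le hm]
    simp [pvFindL]; omega

theorem pvAltGo_false_no_gt (rest : List String) (h : ">" ∉ rest) :
    pvAltGo false rest = rest := by
  induction rest with
  | nil => rfl
  | cons t r ih =>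
    simp only [List.mem_cons, not_or] at h
    simp [pvAltGo, Ne.symm h.1, ih h.2]

theorem pvAltGo_false_split (pre suf : List String) (h : ">" ∉ pre) :
    pvAltGo false (pre ++ ">" :: suf) = pre ++ ">" :: pvAltGo true suf := by
  induction pre with
  | nil => simp [pvAltGo]
  | cons t p ih =>
    simp only [List.mem_cons, not_or] at h
    simp [pvAltGo, Ne.symm h.1, ih h.2]

theorem pvAltGo_true_eq (suf : List String) :
    pvAltGo true suf = List.replicate (pvFindL suf) "string" ++ pvAltGo false (suf.drop (pvFindL suf)) := by
  induction suf with
  | nil => rfl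
  | cons t r ih =>
    by_cases h : t = "<" ∨ t = "cmd"
    · have hne : t ≠ ">" := by rcases h with h | h <;> subst h <;> decide
      simp [pvAltGo, pvFindL, h, hne]
    · simp [pvAltGo, pvFindL, h, ih, List.replicate_succ]

theorem pvAltLoop_eq : ∀ (fuel : Nat) (out rest : List String), rest.length < fuel →
    pvAltLoop fuel out rest = out ++ pvAltGo false rest := by
  intro fuel
  induction fuel with
  | zero => intro out rest h; omega
  | succ fuel ih =>
    intro out rest hn
    rw [pvAltLoop]
    cases hidx : PySem.List.index? rest ">" with
    | none =>
      rw [pvAltGo_false_no_gt rest ((PySem.List.index?_eq_none_iff rest ">").mp hidx)]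
    | some j =>
      obtain ⟨pre, suf, hdec, hlen, hpre⟩ := (PySem.List.index?_eq_some_iff rest ">" j).mp hidx
      subst hdec
      subst hlen
      have hre : pre ++ ">" :: suf = (pre ++ [">"]) ++ suf := by simp
      have hlen2 : (pre ++ [">"]).length = pre.length + 1 := by simp
      have htk : (pre ++ ">" :: suf).take (pre.length + 1) = pre ++ [">"] := by
        rw [hre, ← hlen2, List.take_left]
      have hdp : (pre ++ ">" :: suf).drop (pre.length + 1) = suf := by
        rw [hre, ← hlen2, List.drop_left]
      have hk : pvFindStop (pre ++ ">" :: suf) (pre.length + 1) = pre.length + 1 + pvFindL suf := by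
        rw [pvFindStop_eq_findL _ _ (by simp), hdp]
      have hdrop : (pre ++ ">" :: suf).drop (pre.length + 1 + pvFindL suf)
          = suf.drop (pvFindL suf) := by
        rw [← List.drop_drop, hdp]
      have htail_lt : (suf.drop (pvFindL suf)).length < fuel := by
        simp only [List.length_drop]
        simp only [List.length_append, List.length_cons] at hn
        omega
      simp only [hk, htk, hdrop]
      rw [ih _ _ htail_lt]
      have hrep : pre.length + 1 + pvFindL suf - pre.length - 1 = pvFindL suf := by omega
      rw [hrep, pvAltGo_false_split _ _ hpre, pvAltGo_true_eq suf]
      simp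

-- ===== VERDICT (by name: the statement is the Claim_ definition above) =====
theorem string_generalizer_spec : Claim_equal_string_generalizer := by
  intro lst _
  unfold Spec_string_generalizer string_generalizer string_generalizer_alt
  rw [pvAltLoop_eq (lst.length + 1) [] lst (by omega),
    pvOuterA_eq (lst.length + 1) lst 0 (by omega)]
  simpa using (pv_joint lst.length lst 0 (by omega)).2
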